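-- pv_equiv track=rewrite | github.com/d14405011-sudo/2026-python | weeks/week-10/solutions/1114405011-0429/q10235-easy.py | count_snake_layouts
-- ===== SOURCE A (Python) =====
-- from typing import Dict, List
--
-- MOD = 1_000_000_007
--
-- def count_snake_layouts(grid: List[List[int]]) -> int:
--     n = len(grid)
--     m = len(grid[0]) if n else 0
--
--     # row_dp: 上一列往下接入本列的型態 -> 方法數
--     row_dp: Dict[int, int] = {0: 1}
--
--     for r in range(n):
--         new_row_dp: Dict[int, int] = {}
--
--         for up_mask, base_ways in row_dp.items():
--             # 掃描這一列時的中間狀態：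
--             # next_mask：本列往下的邊（準備給下一列）
--             # left：當前格左邊是否有邊接進來
--             states: Dict[tuple[int, int], int] = {(0, 0): base_ways}
--
--             for c in range(m):
--                 nxt: Dict[tuple[int, int], int] = {}
--
--                 for (next_mask, left), ways in states.items():
--                     up = (up_mask >> c) & 1
--                     is_open = grid[r][c] == 1
--
--                     if not is_open:
--                         # 插座格不能有任何邊
--                         if up == 0 and left == 0:
--                             key = (next_mask, 0)
--                             nxt[key] = (nxt.get(key, 0) + ways) % MOD
--                         continue
--
--                     right_candidates = [0]
--                     if c + 1 < m and grid[r][c + 1] == 1: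
--                         right_candidates.append(1)
--
--                     down_candidates = [0]
--                     if r + 1 < n and grid[r + 1][c] == 1:
--                         down_candidates.append(1)
--
--                     for right in right_candidates:
--                         for down in down_candidates:
--                             # 對開放格，總度數必須剛好 2
--                             if up + left + right + down != 2:
--                                 continue
--
--                             nm = next_mask
--                             if down == 1:
--                                 nm |= 1 << c
--
--                             key = (nm, right)
--                             nxt[key] = (nxt.get(key, 0) + ways) % MOD
--
--                 states = nxt
--
--             # 列尾不能殘留向右的邊
--             for (next_mask, left), ways in states.items():
--                 if left == 0:
--                     new_row_dp[next_mask] = (new_row_dp.get(next_mask, 0) + ways) % MOD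
--
--         row_dp = new_row_dp
--
--     # 最後不能再有往下懸空邊
--     return row_dp.get(0, 0)
-- ===== SOURCE B (Python) =====
-- from typing import List
--
-- MOD = 1_000_000_007
--
-- def _row_confs(grid, r, n, m, up_mask, c, nm, left):
--     # leaves of the choice tree for columns c..m-1: one accepted down-mask per configuration
--     if c == m:
--         return [nm] if left == 0 else []
--     up = (up_mask >> c) & 1
--     if grid[r][c] != 1:
--         if up == 0 and left == 0:
--             return _row_confs(grid, r, n, m, up_mask, c + 1, nm, 0)
--         return []
--     rights = [0, 1] if c + 1 < m and grid[r][c + 1] == 1 else [0]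
--     downs = [0, 1] if r + 1 < n and grid[r + 1][c] == 1 else [0]
--     res = []
--     for right in rights:
--         for down in downs:
--             if up + left + right + down == 2:
--                 res += _row_confs(grid, r, n, m, up_mask, c + 1, nm | (down << c), right)
--     return res
--
-- def count_snake_layouts(grid: List[List[int]]) -> int:
--     n = len(grid)
--     m = len(grid[0]) if n else 0
--     row_dp = {0: 1}
--     for r in range(n):
--         new_row_dp = {}
--         for up_mask, ways in row_dp.items():
--             for d in _row_confs(grid, r, n, m, up_mask, 0, 0, 0):
--                 new_row_dp[d] = (new_row_dp.get(d, 0) + ways) % MOD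
--         row_dp = new_row_dp
--     return row_dp.get(0, 0)
-- ===== Notes on version B (the rewrite author's own statement) =====
-- stated objective: alternative
-- what changed: Replaces A's column-by-column profile DP (a dict of merged (down-mask,left-plug) states threaded through each row) by a backtracking enumeration: a recursive search lists, per row and incoming up-mask, every accepted configuration's down-mask, and only the row-level dict accumulates counts.
-- outside the precondition, e.g. on count_snake_layouts([[1, 5], [7]]): A returns 0, B returns 0
import Mathlib
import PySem

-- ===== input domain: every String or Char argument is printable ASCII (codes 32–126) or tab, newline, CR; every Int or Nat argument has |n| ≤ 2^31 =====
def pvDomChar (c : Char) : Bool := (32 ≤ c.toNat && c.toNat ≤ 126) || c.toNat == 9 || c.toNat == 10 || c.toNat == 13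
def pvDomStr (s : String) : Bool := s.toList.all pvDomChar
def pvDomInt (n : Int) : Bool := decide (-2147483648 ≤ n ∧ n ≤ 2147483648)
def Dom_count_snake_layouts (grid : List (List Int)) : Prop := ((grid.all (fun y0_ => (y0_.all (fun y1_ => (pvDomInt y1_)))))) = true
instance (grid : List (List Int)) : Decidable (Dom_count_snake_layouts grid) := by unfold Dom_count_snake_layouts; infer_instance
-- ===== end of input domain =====

-- B replaces A's column-by-column profile DP (dict of merged (mask,plug) states) by a recursive
-- backtracking enumeration of each row's accepted configurations; alternative algorithm, same results.


def pvMOD : Int := 1000000007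

-- ===== PORT A =====
-- one cell step of A's inner scan: fold over the current states dict
def a_colbody (grid : List (List Int)) (n m r up_mask c : Int)
    (nxt : PySem.Dict (Int × Int) Int) (kv : (Int × Int) × Int) : PySem.Dict (Int × Int) Int :=
  let next_mask := kv.1.1
  let left := kv.1.2
  let ways := kv.2
  let up : Int := PySem.Int.band (up_mask >>> c.toNat) 1
  let is_open := PySem.List.pyGetD (PySem.List.pyGetD grid r []) c 0 == 1
  if !is_open then
    if up == 0 && left == 0 then
      let key := (next_mask, (0 : Int))
      nxt.insert key (PySem.Int.mod (nxt.getD key 0 + ways) pvMOD)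
    else nxt
  else
    let right_candidates : List Int :=
      if decide (c + 1 < m) && (PySem.List.pyGetD (PySem.List.pyGetD grid r []) (c + 1) 0 == 1)
      then [0, 1] else [0]
    let down_candidates : List Int :=
      if decide (r + 1 < n) && (PySem.List.pyGetD (PySem.List.pyGetD grid (r + 1) []) c 0 == 1)
      then [0, 1] else [0]
    right_candidates.foldl (fun nxt right =>
      down_candidates.foldl (fun nxt down =>
        if up + left + right + down != 2 then nxt
        else
          let nm := if down == 1 then PySem.Int.bor next_mask ((1 : Int) <<< c.toNat) else next_mask
          let key := (nm, right)
          nxt.insert key (PySem.Int.mod (nxt.getD key 0 + ways) pvMOD)) nxt) nxt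

-- the work done for one (up_mask, base_ways) item of row_dp: scan the row, then flush states with left == 0
def a_rowbody (grid : List (List Int)) (n m r : Int)
    (new_row_dp : PySem.Dict Int Int) (uw : Int × Int) : PySem.Dict Int Int :=
  let states : PySem.Dict (Int × Int) Int := (PySem.Dict.empty).insert ((0 : Int), (0 : Int)) uw.2
  let states := (PySem.List.pyRange 0 m 1).foldl (fun states c =>
    states.items.foldl (a_colbody grid n m r uw.1 c) PySem.Dict.empty) states
  states.items.foldl (fun new_row_dp kv =>
    if kv.1.2 == 0 then
      new_row_dp.insert kv.1.1 (PySem.Int.mod (new_row_dp.getD kv.1.1 0 + kv.2) pvMOD)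
    else new_row_dp) new_row_dp

def count_snake_layouts (grid : List (List Int)) : Int :=
  let n := PySem.List.len grid
  let m := if n != 0 then PySem.List.len (PySem.List.pyGetD grid 0 []) else 0
  let row_dp : PySem.Dict Int Int := PySem.Dict.ofList [((0 : Int), (1 : Int))]
  let row_dp := (PySem.List.pyRange 0 n 1).foldl (fun row_dp r =>
    row_dp.items.foldl (a_rowbody grid n m r) PySem.Dict.empty) row_dp
  row_dp.getD 0 0

-- ===== PORT B =====
-- B's recursive enumeration: all accepted down-masks reachable from column c with state (nm, left).
-- (Python tests `c == m`; the `m ≤ c` guard is the same test totalised — the entry call has 0 ≤ c ≤ m.)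
def alt_row_confs (grid : List (List Int)) (r n m up_mask : Int) (c nm left : Int) : List Int :=
  if h : m ≤ c then (if left == 0 then [nm] else []) else
    let up : Int := PySem.Int.band (up_mask >>> c.toNat) 1
    if PySem.List.pyGetD (PySem.List.pyGetD grid r []) c 0 != 1 then
      if up == 0 && left == 0 then alt_row_confs grid r n m up_mask (c + 1) nm 0 else []
    else
      let rights : List Int :=
        if decide (c + 1 < m) && (PySem.List.pyGetD (PySem.List.pyGetD grid r []) (c + 1) 0 == 1)
        then [0, 1] else [0]
      let downs : List Int :=
        if decide (r + 1 < n) && (PySem.List.pyGetD (PySem.List.pyGetD grid (r + 1) []) c 0 == 1)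
        then [0, 1] else [0]
      rights.foldl (fun res right =>
        downs.foldl (fun res down =>
          if up + left + right + down == 2 then
            res ++ alt_row_confs grid r n m up_mask (c + 1) (PySem.Int.bor nm (down <<< c.toNat)) right
          else res) res) []
termination_by (m - c).toNat
decreasing_by all_goals omega

def count_snake_layouts_alt (grid : List (List Int)) : Int :=
  let n := PySem.List.len grid
  let m := if n != 0 then PySem.List.len (PySem.List.pyGetD grid 0 []) else 0
  let row_dp : PySem.Dict Int Int := PySem.Dict.ofList [((0 : Int), (1 : Int))]
  let row_dp := (PySem.List.pyRange 0 n 1).foldl (fun row_dp r =>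
    row_dp.items.foldl (fun new_row_dp uw =>
      (alt_row_confs grid r n m uw.1 0 0 0).foldl (fun nd d =>
        nd.insert d (PySem.Int.mod (nd.getD d 0 + uw.2) pvMOD)) new_row_dp) PySem.Dict.empty) row_dp
  row_dp.getD 0 0

-- ===== PRECONDITION & SPEC =====
-- Pre_ excludes ragged grids (some row shorter than the first row): on these A almost always raises
-- IndexError; in the rare ragged case where the DP dies out before a short row is scanned A returns 0
-- (and B returns 0 there as well).
def Pre_count_snake_layouts (grid : List (List Int)) : Prop :=
  ∀ row ∈ grid, (grid.headD []).length ≤ row.length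
instance (grid : List (List Int)) : Decidable (Pre_count_snake_layouts grid) := by
  unfold Pre_count_snake_layouts; infer_instance

def pvWitness_count_snake_layouts : List (List Int) := [[1, 1], [1, 1]]

def Spec_count_snake_layouts (grid : List (List Int)) (out : Int) : Prop := out = count_snake_layouts_alt grid
instance (grid : List (List Int)) (out : Int) : Decidable (Spec_count_snake_layouts grid out) := by unfold Spec_count_snake_layouts; infer_instance

-- ===== CLAIM (what is proved, stated in full; the proofs are below) =====
def Claim_equal_count_snake_layouts : Prop := ∀ (grid : List (List Int)), Dom_count_snake_layouts grid → Pre_count_snake_layouts grid → Spec_count_snake_layouts grid (count_snake_layouts grid)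

-- ===== LEMMAS AND PROOFS =====
-- mod / bump infrastructure ---------------------------------------------------

lemma pvMOD_pos : (0 : Int) < pvMOD := by norm_num [pvMOD]

lemma pvmod_emod (x : Int) : PySem.Int.mod x pvMOD = x % pvMOD :=
  PySem.Int.mod_eq_emod_of_pos pvMOD_pos

lemma pv_emod_modeq (x : Int) : x % pvMOD ≡ x [ZMOD pvMOD] :=
  Int.emod_emod_of_dvd x dvd_rfl

def pvBump {κ : Type} [BEq κ] (a : PySem.Dict κ Int) (k : κ) (v : Int) : PySem.Dict κ Int :=
  a.insert k (PySem.Int.mod (a.getD k 0 + v) pvMOD)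

def pvBumpAll {κ : Type} [BEq κ] (a : PySem.Dict κ Int) (ks : List κ) (v : Int) : PySem.Dict κ Int :=
  ks.foldl (fun a k => pvBump a k v) a

def pvReduced {κ : Type} [BEq κ] (d : PySem.Dict κ Int) : Prop :=
  ∀ k, 0 ≤ d.getD k 0 ∧ d.getD k 0 < pvMOD

lemma pvBump_getD {κ : Type} [BEq κ] [LawfulBEq κ] [DecidableEq κ]
    (a : PySem.Dict κ Int) (k k' : κ) (v : Int) :
    (pvBump a k v).getD k' 0 = if k' = k then (a.getD k 0 + v) % pvMOD else a.getD k' 0 := by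
  simp [pvBump, PySem.Dict.getD_insert, pvmod_emod]

lemma pvBumpAll_getD {κ : Type} [BEq κ] [LawfulBEq κ] [DecidableEq κ]
    (v : Int) (k : κ) : ∀ (ks : List κ) (a : PySem.Dict κ Int),
    (pvBumpAll a ks v).getD k 0 ≡ a.getD k 0 + (ks.count k : Int) * v [ZMOD pvMOD] := by
  intro ks
  induction ks with
  | nil => intro a; simp [pvBumpAll]
  | cons k0 ks ih =>
    intro a
    have h1 : pvBumpAll a (k0 :: ks) v = pvBumpAll (pvBump a k0 v) ks v := rfl
    rw [h1]
    refine (ih (pvBump a k0 v)).trans ?_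
    rw [pvBump_getD]
    by_cases hk : k = k0
    · subst hk
      simp only [List.count_cons_self]
      push_cast
      calc (a.getD k 0 + v) % pvMOD + (ks.count k : Int) * v
          ≡ (a.getD k 0 + v) + (ks.count k : Int) * v [ZMOD pvMOD] :=
            Int.ModEq.add_right _ (pv_emod_modeq _)
        _ = a.getD k 0 + ((ks.count k : Int) + 1) * v := by ring
    · rw [if_neg hk]; simp [Ne.symm hk]

lemma pvBumpAll_mem_keys {κ : Type} [BEq κ] [LawfulBEq κ] [DecidableEq κ]
    (v : Int) (k : κ) : ∀ (ks : List κ) (a : PySem.Dict κ Int),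
    (k ∈ (pvBumpAll a ks v).keys ↔ k ∈ a.keys ∨ k ∈ ks) := by
  intro ks
  induction ks with
  | nil => intro a; simp [pvBumpAll]
  | cons k0 ks ih =>
    intro a
    have h1 : pvBumpAll a (k0 :: ks) v = pvBumpAll (pvBump a k0 v) ks v := rfl
    rw [h1, ih]
    simp [pvBump, PySem.Dict.mem_keys_insert]
    tauto

lemma pvBumpAll_nodup {κ : Type} [BEq κ] [LawfulBEq κ]
    (v : Int) (ks : List κ) (a : PySem.Dict κ Int) (h : a.keys.Nodup) :
    (pvBumpAll a ks v).keys.Nodup := by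
  exact PySem.Dict.nodup_keys_foldl_insert ks
    (fun d x => PySem.Int.mod (d.getD x 0 + v) pvMOD) a h

lemma pvBumpAll_reduced {κ : Type} [BEq κ] [LawfulBEq κ] [DecidableEq κ]
    (v : Int) : ∀ (ks : List κ) (a : PySem.Dict κ Int), pvReduced a → pvReduced (pvBumpAll a ks v) := by
  intro ks
  induction ks with
  | nil => intro a ha; exact ha
  | cons k0 ks ih =>
    intro a ha
    refine ih _ ?_
    intro k
    rw [pvBump_getD]
    split
    · constructor
      · exact Int.emod_nonneg _ (by norm_num [pvMOD])
      · exact Int.emod_lt_of_pos _ pvMOD_pos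
    · exact ha k

-- the "items fold of bumpAll" characterisation -------------------------------

def pvContrib {κ κ' : Type} [BEq κ'] [DecidableEq κ']
    (l : List (κ × Int)) (g : κ → List κ') (k : κ') : Int :=
  (l.map (fun kv => kv.2 * (((g kv.1).count k : Nat) : Int))).sum

lemma pvBigFold_getD {κ κ' : Type} [BEq κ'] [LawfulBEq κ'] [DecidableEq κ']
    (g : κ → List κ') (k : κ') : ∀ (l : List (κ × Int)) (init : PySem.Dict κ' Int),
    (l.foldl (fun acc kv => pvBumpAll acc (g kv.1) kv.2) init).getD k 0
      ≡ init.getD k 0 + pvContrib l g k [ZMOD pvMOD] := by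
  intro l
  induction l with
  | nil => intro init; simp [pvContrib]
  | cons kv l ih =>
    intro init
    rw [List.foldl_cons]
    refine (ih _).trans ?_
    have h2 := pvBumpAll_getD (κ := κ') kv.2 k (g kv.1) init
    calc (pvBumpAll init (g kv.1) kv.2).getD k 0 + pvContrib l g k
        ≡ (init.getD k 0 + ((g kv.1).count k : Int) * kv.2) + pvContrib l g k [ZMOD pvMOD] :=
          Int.ModEq.add_right _ h2
      _ = init.getD k 0 + pvContrib (kv :: l) g k := by
          simp only [pvContrib, List.map_cons, List.sum_cons]; ring

lemma pvBigFold_mem_keys {κ κ' : Type} [BEq κ'] [LawfulBEq κ'] [DecidableEq κ']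
    (g : κ → List κ') (k : κ') : ∀ (l : List (κ × Int)) (init : PySem.Dict κ' Int),
    (k ∈ (l.foldl (fun acc kv => pvBumpAll acc (g kv.1) kv.2) init).keys ↔
      k ∈ init.keys ∨ ∃ kv ∈ l, k ∈ g kv.1) := by
  intro l
  induction l with
  | nil => intro init; simp
  | cons kv l ih =>
    intro init
    rw [List.foldl_cons, ih, pvBumpAll_mem_keys]
    simp only [List.mem_cons]
    constructor
    · rintro ((h | h) | ⟨kv', h1, h2⟩)
      · exact Or.inl h
      · exact Or.inr ⟨kv, Or.inl rfl, h⟩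
      · exact Or.inr ⟨kv', Or.inr h1, h2⟩
    · rintro (h | ⟨kv', (rfl | h1), h2⟩)
      · exact Or.inl (Or.inl h)
      · exact Or.inl (Or.inr h2)
      · exact Or.inr ⟨kv', h1, h2⟩

lemma pvBigFold_nodup {κ κ' : Type} [BEq κ'] [LawfulBEq κ']
    (g : κ → List κ') : ∀ (l : List (κ × Int)) (init : PySem.Dict κ' Int),
    init.keys.Nodup → (l.foldl (fun acc kv => pvBumpAll acc (g kv.1) kv.2) init).keys.Nodup := by
  intro l
  induction l with
  | nil => intro init h; exact h
  | cons kv l ih => intro init h; exact ih _ (pvBumpAll_nodup kv.2 _ _ h)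

lemma pvBigFold_reduced {κ κ' : Type} [BEq κ'] [LawfulBEq κ'] [DecidableEq κ']
    (g : κ → List κ') : ∀ (l : List (κ × Int)) (init : PySem.Dict κ' Int),
    pvReduced init → pvReduced (l.foldl (fun acc kv => pvBumpAll acc (g kv.1) kv.2) init) := by
  intro l
  induction l with
  | nil => intro init h; exact h
  | cons kv l ih => intro init h; exact ih _ (pvBumpAll_reduced kv.2 _ _ h)

-- sum lemmas ------------------------------------------------------------------

lemma pv_sum_modeq {α : Type} (l : List α) (f f' : α → Int)
    (h : ∀ x ∈ l, f x ≡ f' x [ZMOD pvMOD]) : (l.map f).sum ≡ (l.map f').sum [ZMOD pvMOD] := by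
  induction l with
  | nil => rfl
  | cons a l ih =>
    simp only [List.map_cons, List.sum_cons]
    exact Int.ModEq.add (h a (List.mem_cons_self)) (ih (fun x hx => h x (List.mem_cons_of_mem a hx)))

lemma pv_sum_comm {α β : Type} (l2 : List β) (F : α → β → Int) : ∀ (l1 : List α),
    (l1.map (fun a => (l2.map (F a)).sum)).sum = (l2.map (fun b => (l1.map (fun a => F a b)).sum)).sum := by
  intro l1
  induction l1 with
  | nil => simp
  | cons a l1 ih =>
    simp only [List.map_cons, List.sum_cons, ih]
    rw [← List.sum_map_add]

lemma pv_sum_ite_single {κ' : Type} [DecidableEq κ'] (X : κ' → Int) (a : κ') :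
    ∀ (L : List κ'), L.Nodup → a ∈ L → (L.map (fun k => if k = a then X k else 0)).sum = X a := by
  intro L
  induction L with
  | nil => intro _ h; simp at h
  | cons b L ih =>
    intro hn hm
    have hbn : b ∉ L := (List.nodup_cons.mp hn).1
    simp only [List.map_cons, List.sum_cons]
    rcases List.mem_cons.mp hm with rfl | hm
    · rw [if_pos rfl]
      have hz : (L.map (fun k => if k = a then X k else 0)).sum = 0 := by
        apply List.sum_eq_zero
        intro x hx
        obtain ⟨k, hk, rfl⟩ := List.mem_map.mp hx
        rw [if_neg]
        rintro rfl
        exact hbn hk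
      rw [hz, add_zero]
    · have hba : b ≠ a := by rintro rfl; exact hbn hm
      rw [if_neg hba, zero_add]
      exact ih (List.nodup_cons.mp hn).2 hm

lemma pv_count_group {κ' : Type} [BEq κ'] [LawfulBEq κ'] [DecidableEq κ']
    (L : List κ') (hL : L.Nodup) (X : κ' → Int) :
    ∀ (l : List κ'), (∀ x ∈ l, x ∈ L) →
    (L.map (fun k => ((l.count k : Nat) : Int) * X k)).sum = (l.map X).sum := by
  intro l
  induction l with
  | nil =>
    intro _
    apply List.sum_eq_zero
    intro x hx
    obtain ⟨k, hk, rfl⟩ := List.mem_map.mp hx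
    simp
  | cons a l ih =>
    intro hsub
    have ha : a ∈ L := hsub a List.mem_cons_self
    have hstep : ∀ k : κ', ((List.count k (a :: l) : Nat) : Int) * X k
        = ((l.count k : Nat) : Int) * X k + (if k = a then X k else 0) := by
      intro k
      by_cases hk : k = a
      · subst hk; rw [if_pos rfl, List.count_cons_self]; push_cast; ring
      · have hb : (a == k) = false := by simp [Ne.symm hk]
        rw [if_neg hk, List.count_cons, hb]
        simp
    calc (L.map (fun k => ((List.count k (a :: l) : Nat) : Int) * X k)).sum
        = (L.map (fun k => ((l.count k : Nat) : Int) * X k + (if k = a then X k else 0))).sum := by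
          exact congrArg List.sum (List.map_congr_left (fun k _ => hstep k))
      _ = (L.map (fun k => ((l.count k : Nat) : Int) * X k)).sum
            + (L.map (fun k => if k = a then X k else 0)).sum := by
          rw [← List.sum_map_add]
      _ = (l.map X).sum + X a := by
          rw [ih (fun x hx => hsub x (List.mem_cons_of_mem a hx)), pv_sum_ite_single X a L hL ha]
      _ = ((a :: l).map X).sum := by simp [add_comm]

lemma pv_items_keys_sum {κ : Type} [BEq κ] [LawfulBEq κ]
    (d : PySem.Dict κ Int) (hn : d.keys.Nodup) (X : κ → Int) :
    (d.items.map (fun kv => kv.2 * X kv.1)).sum = (d.keys.map (fun k => d.getD k 0 * X k)).sum := by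
  have hk : d.keys = d.items.map (·.1) := rfl
  rw [hk, List.map_map]
  refine congrArg List.sum (List.map_congr_left ?_)
  intro kv hkv
  have : d.getD kv.1 0 = kv.2 :=
    PySem.Dict.getD_of_mem_items d (by simpa using hkv) hn 0
  simp [this]

lemma pv_superset_sum {κ : Type} [BEq κ] [LawfulBEq κ] [DecidableEq κ]
    (d : PySem.Dict κ Int) (hn : d.keys.Nodup) (L : List κ) (hLn : L.Nodup)
    (hsub : ∀ k ∈ d.keys, k ∈ L) (X : κ → Int) :
    (L.map (fun k => d.getD k 0 * X k)).sum = (d.items.map (fun kv => kv.2 * X kv.1)).sum := by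
  rw [pv_items_keys_sum d hn X]
  rw [← List.sum_toFinset _ hLn, ← List.sum_toFinset _ hn]
  refine (Finset.sum_subset ?_ ?_).symm
  · intro k hk
    rw [List.mem_toFinset] at *
    exact hsub k hk
  · intro k _ hk
    rw [List.mem_toFinset] at hk
    have hc : d.contains k = false := by
      rw [PySem.Dict.contains_eq_decide_mem_keys]
      simpa using hk
    rw [PySem.Dict.getD_of_not_contains d 0 hc, zero_mul]

lemma pv_cross_sum (dA dB : PySem.Dict Int Int) (hA : dA.keys.Nodup) (hB : dB.keys.Nodup)
    (h : ∀ k, dA.getD k 0 ≡ dB.getD k 0 [ZMOD pvMOD]) (X : Int → Int) :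
    (dA.items.map (fun kv => kv.2 * X kv.1)).sum ≡ (dB.items.map (fun kv => kv.2 * X kv.1)).sum [ZMOD pvMOD] := by
  set L : List Int := dA.keys ++ dB.keys.filter (fun k => decide (k ∉ dA.keys)) with hLdef
  have hLn : L.Nodup := by
    refine List.Nodup.append hA (hB.filter _) ?_
    intro x hx1 hx2
    have := List.of_mem_filter hx2
    simp at this
    exact this hx1
  have hsubA : ∀ k ∈ dA.keys, k ∈ L := fun k hk => List.mem_append_left _ hk
  have hsubB : ∀ k ∈ dB.keys, k ∈ L := by
    intro k hk
    by_cases hka : k ∈ dA.keys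
    · exact List.mem_append_left _ hka
    · refine List.mem_append_right _ (List.mem_filter.mpr ⟨hk, by simpa using hka⟩)
  rw [← pv_superset_sum dA hA L hLn hsubA X, ← pv_superset_sum dB hB L hLn hsubB X]
  exact pv_sum_modeq L _ _ (fun k _ => (h k).mul_right (X k))

-- nested candidate loops ------------------------------------------------------

lemma pv_ite_bne {γ : Type} (s t : Int) (x y : γ) :
    (if s != t then x else y) = if s == t then y else x := by
  by_cases h : s = t <;> simp [h]

lemma pv_fold_if_filter {β γ δ : Type} (P : β → Bool) (K : β → δ) (u : γ → δ → γ) :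
    ∀ (downs : List β) (acc : γ),
    downs.foldl (fun b down => if P down then u b (K down) else b) acc
      = ((downs.filter P).map K).foldl u acc := by
  intro downs
  induction downs with
  | nil => intro acc; rfl
  | cons d downs ih =>
    intro acc
    cases hP : P d <;> simp only [List.foldl_cons, List.filter_cons, hP] <;>
      simp only [if_true, if_false, Bool.false_eq_true, ite_false, ite_true, List.map_cons, List.foldl_cons] <;>
      exact ih _

lemma pv_nested_fold {α β γ δ : Type} (P : α → β → Bool) (K : α → β → δ) (u : γ → δ → γ)
    (downs : List β) : ∀ (rights : List α) (acc : γ),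
    rights.foldl (fun b right => downs.foldl (fun b down => if P right down then u b (K right down) else b) b) acc
      = (rights.flatMap (fun right => ((downs.filter (P right)).map (K right)))).foldl u acc := by
  intro rights
  induction rights with
  | nil => intro acc; rfl
  | cons rr rights ih =>
    intro acc
    simp only [List.foldl_cons, List.flatMap_cons, List.foldl_append]
    rw [pv_fold_if_filter]
    exact ih _

-- the per-column generated key list (A's inserts = B's branch children) -------

def pvGcol (grid : List (List Int)) (n m r up_mask c : Int) (key : Int × Int) : List (Int × Int) :=
  let up : Int := PySem.Int.band (up_mask >>> c.toNat) 1
  if !(PySem.List.pyGetD (PySem.List.pyGetD grid r []) c 0 == 1) then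
    (if up == 0 && key.2 == 0 then [(key.1, (0 : Int))] else [])
  else
    let rights : List Int :=
      if decide (c + 1 < m) && (PySem.List.pyGetD (PySem.List.pyGetD grid r []) (c + 1) 0 == 1)
      then [0, 1] else [0]
    let downs : List Int :=
      if decide (r + 1 < n) && (PySem.List.pyGetD (PySem.List.pyGetD grid (r + 1) []) c 0 == 1)
      then [0, 1] else [0]
    rights.flatMap (fun right =>
      ((downs.filter (fun down => up + key.2 + right + down == 2)).map
        (fun down => ((if down == 1 then PySem.Int.bor key.1 ((1 : Int) <<< c.toNat) else key.1), right))))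

lemma pv_colbody_eq (grid : List (List Int)) (n m r up c : Int)
    (nxt : PySem.Dict (Int × Int) Int) (kv : (Int × Int) × Int) :
    a_colbody grid n m r up c nxt kv = pvBumpAll nxt (pvGcol grid n m r up c kv.1) kv.2 := by
  cases hopen : (PySem.List.pyGetD (PySem.List.pyGetD grid r []) c 0 == 1) with
  | false =>
    simp only [a_colbody, pvGcol, hopen, Bool.not_false, if_true]
    split
    · simp [pvBumpAll, pvBump]
    · simp [pvBumpAll]
  | true =>
    simp only [a_colbody, pvGcol, hopen, Bool.not_true, Bool.false_eq_true, if_false]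
    simp only [pv_ite_bne]
    exact pv_nested_fold
      (fun right down => PySem.Int.band (up >>> c.toNat) 1 + kv.1.2 + right + down == 2)
      (fun right down =>
        ((if down == 1 then PySem.Int.bor kv.1.1 ((1 : Int) <<< c.toNat) else kv.1.1), right))
      (fun b k => pvBump b k kv.2) _ _ nxt

def pvGEnd (key : Int × Int) : List Int := if key.2 == 0 then [key.1] else []

lemma pv_endbody_eq (acc : PySem.Dict Int Int) (kv : (Int × Int) × Int) :
    (if kv.1.2 == 0 then
       acc.insert kv.1.1 (PySem.Int.mod (acc.getD kv.1.1 0 + kv.2) pvMOD)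
     else acc) = pvBumpAll acc (pvGEnd kv.1) kv.2 := by
  unfold pvGEnd
  split
  · simp [pvBumpAll, pvBump]
  · simp [pvBumpAll]

-- unfolding B's recursion -----------------------------------------------------

lemma pv_confs_end (grid : List (List Int)) (r n m up c nm l : Int) (h : m ≤ c) :
    alt_row_confs grid r n m up c nm l = if l == 0 then [nm] else [] := by
  rw [alt_row_confs]; simp [h]

lemma pv_confs_step (grid : List (List Int)) (r n m up c nm l : Int) (h : ¬ m ≤ c) :
    alt_row_confs grid r n m up c nm l
      = (pvGcol grid n m r up c (nm, l)).flatMap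
          (fun k => alt_row_confs grid r n m up (c + 1) k.1 k.2) := by
  conv_lhs => rw [alt_row_confs]
  rw [dif_neg h]
  cases hopen : (PySem.List.pyGetD (PySem.List.pyGetD grid r []) c 0 == 1) with
  | false =>
    simp only [pvGcol, hopen, Bool.not_false, if_true, bne, Bool.not_false]
    split
    · simp
    · simp
  | true =>
    simp only [pvGcol, hopen, Bool.not_true, Bool.false_eq_true, if_false, bne, Bool.not_true]
    rw [pv_nested_fold
      (fun right down => PySem.Int.band (up >>> c.toNat) 1 + l + right + down == 2)
      (fun right down => (PySem.Int.bor nm (down <<< c.toNat), right))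
      (fun res k => res ++ alt_row_confs grid r n m up (c + 1) k.1 k.2) _ _ []]
    rw [PySem.List.foldl_append_eq_flatMap]
    rw [List.nil_append]
    refine congrArg (List.flatMap (fun k : Int × Int => alt_row_confs grid r n m up (c + 1) k.1 k.2)) ?_
    refine List.flatMap_congr ?_
    intro right _
    refine List.map_congr_left ?_
    intro down hd
    have hd01 : down = 0 ∨ down = 1 := by
      revert hd
      split <;> intro hd <;> simp_all
    rcases hd01 with rfl | rfl
    · simp [Int.zero_shiftLeft, PySem.Int.bor_zero]
    · simp

-- row-scan invariant ----------------------------------------------------------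

def pvFsum (grid : List (List Int)) (r n m up c : Int)
    (st : PySem.Dict (Int × Int) Int) (D : Int) : Int :=
  (st.items.map (fun kv => kv.2 * (((alt_row_confs grid r n m up c kv.1.1 kv.1.2).count D : Nat) : Int))).sum

lemma pv_colstep_nodup (grid : List (List Int)) (n m r up c : Int)
    (st : PySem.Dict (Int × Int) Int) :
    (st.items.foldl (a_colbody grid n m r up c) PySem.Dict.empty).keys.Nodup := by
  have hfun : a_colbody grid n m r up c
      = fun acc kv => pvBumpAll acc (pvGcol grid n m r up c kv.1) kv.2 :=
    funext fun acc => funext fun kv => pv_colbody_eq grid n m r up c acc kv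
  rw [hfun]
  exact pvBigFold_nodup _ _ _ PySem.Dict.nodup_keys_empty

lemma pv_count_flatMap {α β : Type} [DecidableEq β] (l : List α) (f : α → List β) (D : β) :
    (List.count D (l.flatMap f) : Int) = (l.map (fun x => ((f x).count D : Int))).sum := by
  induction l with
  | nil => simp
  | cons a l ih => simp [List.flatMap_cons, List.count_append, ih]

lemma pv_colstep (grid : List (List Int)) (n m r up c : Int)
    (st : PySem.Dict (Int × Int) Int) (hn : st.keys.Nodup) (hc : ¬ m ≤ c) (D : Int) :
    pvFsum grid r n m up (c + 1) (st.items.foldl (a_colbody grid n m r up c) PySem.Dict.empty) D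
      ≡ pvFsum grid r n m up c st D [ZMOD pvMOD] := by
  have hfun : a_colbody grid n m r up c
      = fun acc kv => pvBumpAll acc (pvGcol grid n m r up c kv.1) kv.2 :=
    funext fun acc => funext fun kv => pv_colbody_eq grid n m r up c acc kv
  set g : (Int × Int) → List (Int × Int) := pvGcol grid n m r up c with hg
  set st' := st.items.foldl (a_colbody grid n m r up c) PySem.Dict.empty with hst'
  have hst'2 : st' = st.items.foldl (fun acc kv => pvBumpAll acc (g kv.1) kv.2) PySem.Dict.empty := by
    rw [hst', hfun]
  have hn' : st'.keys.Nodup := pv_colstep_nodup grid n m r up c st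
  set X : Int × Int → Int :=
    fun k' => (((alt_row_confs grid r n m up (c + 1) k'.1 k'.2).count D : Nat) : Int) with hX
  have hgetD : ∀ k', st'.getD k' 0 ≡ pvContrib st.items g k' [ZMOD pvMOD] := by
    intro k'
    rw [hst'2]
    refine (pvBigFold_getD g k' st.items PySem.Dict.empty).trans ?_
    rw [PySem.Dict.getD_empty, zero_add]
  have hsupp : ∀ kv ∈ st.items, ∀ x ∈ g kv.1, x ∈ st'.keys := by
    intro kv hkv x hx
    rw [hst'2]
    exact (pvBigFold_mem_keys g x st.items PySem.Dict.empty).mpr (Or.inr ⟨kv, hkv, hx⟩)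
  calc pvFsum grid r n m up (c + 1) st' D
      = (st'.items.map (fun kv => kv.2 * X kv.1)).sum := rfl
    _ = (st'.keys.map (fun k => st'.getD k 0 * X k)).sum := pv_items_keys_sum st' hn' X
    _ ≡ (st'.keys.map (fun k => pvContrib st.items g k * X k)).sum [ZMOD pvMOD] :=
        pv_sum_modeq _ _ _ (fun k _ => (hgetD k).mul_right (X k))
    _ = (st'.keys.map (fun k => (st.items.map
          (fun kv => kv.2 * (((g kv.1).count k : Nat) : Int) * X k)).sum)).sum := by
        refine congrArg List.sum (List.map_congr_left ?_)
        intro k _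
        unfold pvContrib
        rw [List.sum_map_mul_right]
    _ = (st.items.map (fun kv => (st'.keys.map
          (fun k => kv.2 * (((g kv.1).count k : Nat) : Int) * X k)).sum)).sum := by
        rw [pv_sum_comm]
    _ = (st.items.map (fun kv => kv.2 * ((g kv.1).map X).sum)).sum := by
        refine congrArg List.sum (List.map_congr_left ?_)
        intro kv hkv
        have h1 : (st'.keys.map (fun k => kv.2 * (((g kv.1).count k : Nat) : Int) * X k)).sum
            = kv.2 * (st'.keys.map (fun k => (((g kv.1).count k : Nat) : Int) * X k)).sum := by
          rw [← PySem.List.sum_map_const_mul_int]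
          refine congrArg List.sum (List.map_congr_left ?_)
          intro k _
          ring
        rw [h1, pv_count_group st'.keys hn' X (g kv.1) (hsupp kv hkv)]
    _ = (st.items.map (fun kv => kv.2 *
          (((alt_row_confs grid r n m up c kv.1.1 kv.1.2).count D : Nat) : Int))).sum := by
        refine congrArg List.sum (List.map_congr_left ?_)
        intro kv _
        rw [pv_confs_step grid r n m up c kv.1.1 kv.1.2 hc]
        rw [pv_count_flatMap]
    _ = pvFsum grid r n m up c st D := rfl

lemma pv_colchain (grid : List (List Int)) (n m r up : Int) :
    ∀ (fuel : ℕ) (c : Int), (m - c).toNat = fuel → ∀ (st : PySem.Dict (Int × Int) Int), st.keys.Nodup →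
    ((PySem.List.pyRange c m 1).foldl
        (fun states c => states.items.foldl (a_colbody grid n m r up c) PySem.Dict.empty) st).keys.Nodup ∧
    ∀ D, pvFsum grid r n m up m
        ((PySem.List.pyRange c m 1).foldl
          (fun states c => states.items.foldl (a_colbody grid n m r up c) PySem.Dict.empty) st) D
      ≡ pvFsum grid r n m up c st D [ZMOD pvMOD] := by
  intro fuel
  induction fuel with
  | zero =>
    intro c hfuel st hn
    have hmc : m ≤ c := by omega
    rw [PySem.List.pyRange_one_eq_nil hmc]
    refine ⟨hn, fun D => ?_⟩
    simp only [List.foldl_nil]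
    have heq : pvFsum grid r n m up m st D = pvFsum grid r n m up c st D := by
      unfold pvFsum
      refine congrArg List.sum (List.map_congr_left ?_)
      intro kv _
      rw [pv_confs_end grid r n m up m kv.1.1 kv.1.2 (le_refl m),
        pv_confs_end grid r n m up c kv.1.1 kv.1.2 hmc]
    rw [heq]
  | succ fuel ih =>
    intro c hfuel st hn
    have hcm : c < m := by omega
    rw [PySem.List.pyRange_one_cons hcm, List.foldl_cons]
    obtain ⟨hn1, hF1⟩ := ih (c + 1) (by omega)
      (st.items.foldl (a_colbody grid n m r up c) PySem.Dict.empty)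
      (pv_colstep_nodup grid n m r up c st)
    exact ⟨hn1, fun D => (hF1 D).trans (pv_colstep grid n m r up c st hn (not_le.mpr hcm) D)⟩

def pvCnt (grid : List (List Int)) (r n m up D : Int) : Int :=
  (((alt_row_confs grid r n m up 0 0 0).count D : Nat) : Int)

lemma pv_rowbody_getD (grid : List (List Int)) (n m r : Int)
    (acc : PySem.Dict Int Int) (uw : Int × Int) (D : Int) :
    (a_rowbody grid n m r acc uw).getD D 0
      ≡ acc.getD D 0 + uw.2 * pvCnt grid r n m uw.1 D [ZMOD pvMOD] := by
  have hend : (fun (acc : PySem.Dict Int Int) (kv : (Int × Int) × Int) =>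
      if kv.1.2 == 0 then
        acc.insert kv.1.1 (PySem.Int.mod (acc.getD kv.1.1 0 + kv.2) pvMOD)
      else acc) = fun acc kv => pvBumpAll acc (pvGEnd kv.1) kv.2 :=
    funext fun acc => funext fun kv => pv_endbody_eq acc kv
  set st0 : PySem.Dict (Int × Int) Int := (PySem.Dict.empty).insert ((0 : Int), (0 : Int)) uw.2 with hst0
  have hn0 : st0.keys.Nodup := PySem.Dict.nodup_keys_insert _ _ _ PySem.Dict.nodup_keys_empty
  obtain ⟨hnm, hF⟩ := pv_colchain grid n m r uw.1 ((m - 0).toNat) 0 rfl st0 hn0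
  set stm := (PySem.List.pyRange 0 m 1).foldl
    (fun states c => states.items.foldl (a_colbody grid n m r uw.1 c) PySem.Dict.empty) st0 with hstm
  have hbody : a_rowbody grid n m r acc uw
      = stm.items.foldl (fun acc kv => pvBumpAll acc (pvGEnd kv.1) kv.2) acc := by
    rw [← hend]
    rfl
  rw [hbody]
  refine (pvBigFold_getD pvGEnd D stm.items acc).trans ?_
  have h1 : pvContrib stm.items pvGEnd D = pvFsum grid r n m uw.1 m stm D := by
    unfold pvContrib pvFsum
    refine congrArg List.sum (List.map_congr_left ?_)
    intro kv _
    rw [pv_confs_end grid r n m uw.1 m kv.1.1 kv.1.2 (le_refl m)]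
    rfl
  rw [h1]
  refine Int.ModEq.add_left _ ((hF D).trans ?_)
  have h2 : st0.items = [(((0 : Int), (0 : Int)), uw.2)] := by
    rw [hst0, PySem.Dict.items_insert_of_not_contains _ _ (PySem.Dict.contains_empty _)]
    rfl
  unfold pvFsum pvCnt
  rw [h2]
  simp

lemma pv_rowbody_nodup (grid : List (List Int)) (n m r : Int)
    (acc : PySem.Dict Int Int) (uw : Int × Int) (h : acc.keys.Nodup) :
    (a_rowbody grid n m r acc uw).keys.Nodup := by
  have hend : (fun (acc : PySem.Dict Int Int) (kv : (Int × Int) × Int) =>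
      if kv.1.2 == 0 then
        acc.insert kv.1.1 (PySem.Int.mod (acc.getD kv.1.1 0 + kv.2) pvMOD)
      else acc) = fun acc kv => pvBumpAll acc (pvGEnd kv.1) kv.2 :=
    funext fun acc => funext fun kv => pv_endbody_eq acc kv
  have hbody : a_rowbody grid n m r acc uw
      = ((PySem.List.pyRange 0 m 1).foldl
          (fun states c => states.items.foldl (a_colbody grid n m r uw.1 c) PySem.Dict.empty)
          ((PySem.Dict.empty).insert ((0 : Int), (0 : Int)) uw.2)).items.foldl
          (fun acc kv => pvBumpAll acc (pvGEnd kv.1) kv.2) acc := by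
    rw [← hend]
    rfl
  rw [hbody]
  exact pvBigFold_nodup _ _ _ h

lemma pv_rowbody_reduced (grid : List (List Int)) (n m r : Int)
    (acc : PySem.Dict Int Int) (uw : Int × Int) (h : pvReduced acc) :
    pvReduced (a_rowbody grid n m r acc uw) := by
  have hend : (fun (acc : PySem.Dict Int Int) (kv : (Int × Int) × Int) =>
      if kv.1.2 == 0 then
        acc.insert kv.1.1 (PySem.Int.mod (acc.getD kv.1.1 0 + kv.2) pvMOD)
      else acc) = fun acc kv => pvBumpAll acc (pvGEnd kv.1) kv.2 :=
    funext fun acc => funext fun kv => pv_endbody_eq acc kv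
  have hbody : a_rowbody grid n m r acc uw
      = ((PySem.List.pyRange 0 m 1).foldl
          (fun states c => states.items.foldl (a_colbody grid n m r uw.1 c) PySem.Dict.empty)
          ((PySem.Dict.empty).insert ((0 : Int), (0 : Int)) uw.2)).items.foldl
          (fun acc kv => pvBumpAll acc (pvGEnd kv.1) kv.2) acc := by
    rw [← hend]
    rfl
  rw [hbody]
  exact pvBigFold_reduced _ _ _ h

lemma pv_foldl_pres {σ α : Type} (P : σ → Prop) (body : σ → α → σ)
    (h : ∀ s a, P s → P (body s a)) : ∀ (l : List α) (s : σ), P s → P (l.foldl body s) := by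
  intro l
  induction l with
  | nil => intro s hs; exact hs
  | cons a l ih => intro s hs; exact ih _ (h s a hs)

lemma pv_fold_body_modeq (body : PySem.Dict Int Int → (Int × Int) → PySem.Dict Int Int)
    (φ : Int → Int → Int)
    (hb : ∀ acc kv D, (body acc kv).getD D 0 ≡ acc.getD D 0 + kv.2 * φ kv.1 D [ZMOD pvMOD]) :
    ∀ (l : List (Int × Int)) (init : PySem.Dict Int Int) (D : Int),
    (l.foldl body init).getD D 0
      ≡ init.getD D 0 + (l.map (fun kv => kv.2 * φ kv.1 D)).sum [ZMOD pvMOD] := by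
  intro l
  induction l with
  | nil => intro init D; simp
  | cons kv l ih =>
    intro init D
    rw [List.foldl_cons]
    refine (ih _ D).trans ?_
    calc (body init kv).getD D 0 + (l.map (fun kv => kv.2 * φ kv.1 D)).sum
        ≡ (init.getD D 0 + kv.2 * φ kv.1 D) + (l.map (fun kv => kv.2 * φ kv.1 D)).sum [ZMOD pvMOD] :=
          Int.ModEq.add_right _ (hb init kv D)
      _ = init.getD D 0 + ((kv :: l).map (fun kv => kv.2 * φ kv.1 D)).sum := by
          simp only [List.map_cons, List.sum_cons]; ring

-- the two row transitions agree -----------------------------------------------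

def pvInv (dA dB : PySem.Dict Int Int) : Prop :=
  dA.keys.Nodup ∧ dB.keys.Nodup ∧ pvReduced dA ∧ pvReduced dB ∧
    ∀ k, dA.getD k 0 ≡ dB.getD k 0 [ZMOD pvMOD]

lemma pv_row_inv (grid : List (List Int)) (n m r : Int) (dA dB : PySem.Dict Int Int)
    (h : pvInv dA dB) :
    pvInv (dA.items.foldl (a_rowbody grid n m r) PySem.Dict.empty)
      (dB.items.foldl (fun new_row_dp uw =>
        (alt_row_confs grid r n m uw.1 0 0 0).foldl (fun nd d =>
          nd.insert d (PySem.Int.mod (nd.getD d 0 + uw.2) pvMOD)) new_row_dp) PySem.Dict.empty) := by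
  obtain ⟨hnA, hnB, hrA, hrB, hmAB⟩ := h
  have hBbody : (fun (new_row_dp : PySem.Dict Int Int) (uw : Int × Int) =>
      (alt_row_confs grid r n m uw.1 0 0 0).foldl (fun nd d =>
        nd.insert d (PySem.Int.mod (nd.getD d 0 + uw.2) pvMOD)) new_row_dp)
      = fun acc kv => pvBumpAll acc (alt_row_confs grid r n m kv.1 0 0 0) kv.2 := rfl
  have hredE : pvReduced (PySem.Dict.empty : PySem.Dict Int Int) := by
    intro k
    rw [PySem.Dict.getD_empty]
    norm_num [pvMOD]
  refine ⟨?_, ?_, ?_, ?_, ?_⟩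
  · exact pv_foldl_pres _ _ (fun s a hs => pv_rowbody_nodup grid n m r s a hs) dA.items
      PySem.Dict.empty PySem.Dict.nodup_keys_empty
  · rw [hBbody]
    exact pvBigFold_nodup (κ := Int) (fun u => alt_row_confs grid r n m u 0 0 0) dB.items
      PySem.Dict.empty PySem.Dict.nodup_keys_empty
  · exact pv_foldl_pres _ _ (fun s a hs => pv_rowbody_reduced grid n m r s a hs) dA.items
      PySem.Dict.empty hredE
  · rw [hBbody]
    exact pvBigFold_reduced (κ := Int) (fun u => alt_row_confs grid r n m u 0 0 0) dB.items
      PySem.Dict.empty hredE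
  · intro k
    have hA := pv_fold_body_modeq (a_rowbody grid n m r) (fun u D => pvCnt grid r n m u D)
      (fun acc kv D => pv_rowbody_getD grid n m r acc kv D) dA.items PySem.Dict.empty k
    rw [PySem.Dict.getD_empty, zero_add] at hA
    have hbB : ∀ (acc : PySem.Dict Int Int) (kv : Int × Int) (D : Int),
        (pvBumpAll acc (alt_row_confs grid r n m kv.1 0 0 0) kv.2).getD D 0
          ≡ acc.getD D 0 + kv.2 * pvCnt grid r n m kv.1 D [ZMOD pvMOD] := by
      intro acc kv D
      have h1 := pvBumpAll_getD kv.2 D (alt_row_confs grid r n m kv.1 0 0 0) acc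
      rw [show (((alt_row_confs grid r n m kv.1 0 0 0).count D : Nat) : Int) * kv.2
          = kv.2 * pvCnt grid r n m kv.1 D from by unfold pvCnt; ring] at h1
      exact h1
    have hB := pv_fold_body_modeq _ (fun u D => pvCnt grid r n m u D) hbB dB.items
      PySem.Dict.empty k
    rw [PySem.Dict.getD_empty, zero_add] at hB
    rw [hBbody]
    refine hA.trans (Int.ModEq.trans ?_ hB.symm)
    exact pv_cross_sum dA dB hnA hnB hmAB (fun u => pvCnt grid r n m u k)

lemma pv_rows_chain (grid : List (List Int)) (n m : Int) :
    ∀ (rs : List Int) (dA dB : PySem.Dict Int Int), pvInv dA dB →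
    pvInv (rs.foldl (fun row_dp r => row_dp.items.foldl (a_rowbody grid n m r) PySem.Dict.empty) dA)
      (rs.foldl (fun row_dp r => row_dp.items.foldl (fun new_row_dp uw =>
        (alt_row_confs grid r n m uw.1 0 0 0).foldl (fun nd d =>
          nd.insert d (PySem.Int.mod (nd.getD d 0 + uw.2) pvMOD)) new_row_dp) PySem.Dict.empty) dB) := by
  intro rs
  induction rs with
  | nil => intro dA dB h; exact h
  | cons r rs ih =>
    intro dA dB h
    exact ih _ _ (pv_row_inv grid n m r dA dB h)

lemma pv_inv_getD_eq (dA dB : PySem.Dict Int Int) (h : pvInv dA dB) :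
    dA.getD 0 0 = dB.getD 0 0 := by
  obtain ⟨_, _, hra, hrb, hm⟩ := h
  have h1 := (hm 0).dvd
  have h2 := (hra 0).1
  have h3 := (hra 0).2
  have h4 := (hrb 0).1
  have h5 := (hrb 0).2
  simp only [pvMOD] at h1 h3 h5
  omega

lemma pv_inv_init : pvInv (PySem.Dict.ofList [((0 : Int), (1 : Int))]) (PySem.Dict.ofList [((0 : Int), (1 : Int))]) := by
  have hg : ∀ k : Int, (PySem.Dict.ofList [((0 : Int), (1 : Int))]).getD k 0 = if k = 0 then 1 else 0 := by
    intro k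
    rw [show (PySem.Dict.ofList [((0 : Int), (1 : Int))]) = (PySem.Dict.empty).insert 0 1 from rfl,
      PySem.Dict.getD_insert]
    simp
  refine ⟨PySem.Dict.nodup_keys_ofList _, PySem.Dict.nodup_keys_ofList _, ?_, ?_, fun k => Int.ModEq.refl _⟩ <;>
  · intro k
    rw [hg k]
    split <;> norm_num [pvMOD]

-- ===== VERDICT (by name: the statement is the Claim_ definition above) =====
theorem count_snake_layouts_spec : Claim_equal_count_snake_layouts := by
  unfold Claim_equal_count_snake_layouts
  intro grid _ _
  unfold Spec_count_snake_layouts count_snake_layouts count_snake_layouts_alt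
  exact pv_inv_getD_eq _ _
    (pv_rows_chain grid (PySem.List.len grid)
      (if PySem.List.len grid != 0 then PySem.List.len (PySem.List.pyGetD grid 0 []) else 0)
      (PySem.List.pyRange 0 (PySem.List.len grid) 1) _ _ pv_inv_init)
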